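-- pv_equiv track=rewrite | github.com/Junroot/Algorithm | programmers/64063.py | solution
-- ===== SOURCE A (Python) =====
-- def solution(k, room_number):
--     answer = []
--     next_rooms = dict()
--
--     def get_next_room(number):
--         if number not in next_rooms:
--             return number
--         next_rooms[number] = get_next_room(next_rooms[number])
--         return next_rooms[number]
--
--     for room in room_number:
--         next_room = get_next_room(room)
--         answer.append(next_room)
--         next_rooms[next_room] = next_room + 1
--
--     return answer
-- ===== SOURCE B (Python) =====
-- def solution(k, room_number):
--     answer = []
--     taken = set()
--     for room in room_number:
--         m = room
--         while m in taken:
--             m += 1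
--         answer.append(m)
--         taken.add(m)
--     return answer
-- ===== Notes on version B (the rewrite author's own statement) =====
-- stated objective: simpler
-- what changed: The union-find dict with recursive path compression is replaced by a plain set of taken rooms and a linear scan: the answer for each request is the first integer >= it that is not yet taken.
import Mathlib
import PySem

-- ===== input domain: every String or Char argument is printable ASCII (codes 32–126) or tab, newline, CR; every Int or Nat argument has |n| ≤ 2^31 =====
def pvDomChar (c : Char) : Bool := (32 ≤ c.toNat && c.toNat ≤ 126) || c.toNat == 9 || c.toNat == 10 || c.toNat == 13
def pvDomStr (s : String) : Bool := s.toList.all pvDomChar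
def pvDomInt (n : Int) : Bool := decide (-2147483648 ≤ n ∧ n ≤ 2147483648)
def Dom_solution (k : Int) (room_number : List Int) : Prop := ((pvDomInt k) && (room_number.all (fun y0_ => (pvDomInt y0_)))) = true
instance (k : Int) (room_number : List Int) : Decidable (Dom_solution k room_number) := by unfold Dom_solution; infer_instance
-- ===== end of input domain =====

-- B replaces A's union-find dict with recursive path compression by a plain set
-- of taken rooms and a linear scan for the first free number — simpler code,
-- same return value (no speed claim).


-- ===== PORT A =====
-- get_next_room: reads happen on the descent (the dict is only written on the
-- unwind); each unwind step does next_rooms[number] = result.  The fuel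
-- argument is only a totality guard: the chain visits distinct keys of d, so
-- d.items.length + 1 always suffices (proved below).
def getNextRoomA (fuel : Nat) (d : PySem.Dict Int Int) (number : Int) : Int × PySem.Dict Int Int :=
  match fuel with
  | 0 => (number, d)
  | fuel + 1 =>
    match d.get? number with
    | none => (number, d)
    | some m =>
      let res := getNextRoomA fuel d m
      (res.1, res.2.insert number res.1)

def solution (k : Int) (room_number : List Int) : List Int :=
  (room_number.foldl
    (fun (st : List Int × PySem.Dict Int Int) room =>
      let res := getNextRoomA (st.2.items.length + 1) st.2 room
      (st.1 ++ [res.1], res.2.insert res.1 (res.1 + 1)))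
    ([], PySem.Dict.empty)).1

-- ===== PORT B =====
-- 'while m in taken: m += 1' — the fuel is a totality guard: every bump hits a
-- distinct element of the set, so taken.length + 1 always suffices (proved below).
def findFreeB (fuel : Nat) (taken : PySem.Set Int) (m : Int) : Int :=
  match fuel with
  | 0 => m
  | fuel + 1 => if taken.contains m then findFreeB fuel taken (m + 1) else m

def solution_alt (k : Int) (room_number : List Int) : List Int :=
  (room_number.foldl
    (fun (st : List Int × PySem.Set Int) room =>
      let m := findFreeB (st.2.length + 1) st.2 room
      (st.1 ++ [m], st.2.add m))
    ([], PySem.Set.empty)).1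

-- ===== PRECONDITION & SPEC =====
def Spec_solution (k : Int) (room_number : List Int) (out : List Int) : Prop := out = solution_alt k room_number
instance (k : Int) (room_number : List Int) (out : List Int) : Decidable (Spec_solution k room_number out) := by unfold Spec_solution; infer_instance

-- ===== CLAIM =====
def Claim_equal_solution : Prop := ∀ (k : Int) (room_number : List Int), Dom_solution k room_number → Spec_solution k room_number (solution k room_number)

-- ===== LEMMAS AND PROOFS =====

-- r is the first non-taken number ≥ n, for membership predicate mem
def FreeSpec (mem : Int → Bool) (n r : Int) : Prop :=
  n ≤ r ∧ mem r = false ∧ ∀ j : Int, n ≤ j → j < r → mem j = true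

lemma FreeSpec_unique {mem : Int → Bool} {n r r' : Int}
    (h : FreeSpec mem n r) (h' : FreeSpec mem n r') : r = r' := by
  rcases lt_trichotomy r r' with hlt | heq | hgt
  · have := h'.2.2 r h.1 hlt
    rw [h.2.1] at this; cases this
  · exact heq
  · have := h.2.2 r' h'.1 hgt
    rw [h'.2.1] at this; cases this

-- a member satisfying q but not p forces a strict countP inequality
lemma countP_lt {α : Type} (p q : α → Bool) (l : List α) (a : α)
    (ha : a ∈ l) (hqa : q a = true) (hpa : p a = false)
    (himp : ∀ x, p x = true → q x = true) : l.countP p < l.countP q := by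
  induction l with
  | nil => cases ha
  | cons b l ih =>
    rcases List.mem_cons.mp ha with h | h
    · subst h
      rw [List.countP_cons, List.countP_cons, hqa, hpa]
      have := List.countP_mono_left (l := l) (p := p) (q := q) (fun x _ => himp x)
      simp only [Bool.false_eq_true, if_false, if_true]
      omega
    · rw [List.countP_cons, List.countP_cons]
      have := ih h
      by_cases hb : p b = true
      · rw [hb, himp b hb]; omega
      · rw [Bool.not_eq_true] at hb
        rw [hb]
        cases hq : q b <;> simp <;> omega

-- ----- B side -----

-- number of elements of the list ≥ n (the scan's termination measure)
def cntGe (l : List Int) (n : Int) : Nat := l.countP (fun x => decide (n ≤ x))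

lemma cntGe_lt (l : List Int) (n : Int) (h : n ∈ l) : cntGe l (n + 1) < cntGe l n := by
  refine countP_lt _ _ l n h (by simp) (by simp) ?_
  intro x hx
  simp only [decide_eq_true_eq] at hx ⊢
  omega

lemma findFreeB_spec (fuel : Nat) (s : PySem.Set Int) (n : Int)
    (hf : cntGe s n < fuel) : FreeSpec (fun x => s.contains x) n (findFreeB fuel s n) := by
  induction fuel generalizing n with
  | zero => omega
  | succ fuel ih =>
    unfold findFreeB
    by_cases hc : s.contains n = true
    · rw [if_pos hc]
      have hmem : n ∈ s := by
        simpa [PySem.Set.contains] using hc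
      have hf' : cntGe s (n + 1) < fuel := by
        have := cntGe_lt s n hmem
        omega
      obtain ⟨h1, h2, h3⟩ := ih (n + 1) hf'
      refine ⟨by omega, h2, ?_⟩
      intro j hj1 hj2
      by_cases hjn : j = n
      · subst hjn; exact hc
      · exact h3 j (by omega) hj2
    · rw [if_neg hc]
      exact ⟨le_refl n, by simpa using hc, fun j h1 h2 => absurd h2 (by omega)⟩

-- ----- A side -----

-- the loop invariant on A's dict: every edge points strictly upward and the
-- whole interval below it is occupied
def InvA (d : PySem.Dict Int Int) : Prop :=
  ∀ q ∈ d.items, q.1 < q.2 ∧ ∀ j : Int, q.1 ≤ j → j < q.2 → d.contains j = true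

-- number of stored pairs with key ≥ n (the recursion's termination measure)
def cntKeyGe (d : PySem.Dict Int Int) (n : Int) : Nat :=
  d.items.countP (fun q => decide (n ≤ q.1))

lemma cntKeyGe_lt (d : PySem.Dict Int Int) (n m : Int) (hnm : n < m)
    (h : d.get? n = some m) : cntKeyGe d m < cntKeyGe d n := by
  refine countP_lt _ _ d.items (n, m) (PySem.Dict.mem_items_of_get?_eq_some d h)
    (by simp) (by simp; omega) ?_
  intro x hx
  simp only [decide_eq_true_eq] at hx ⊢
  omega

lemma getNextRoomA_spec (fuel : Nat) (d : PySem.Dict Int Int) (n : Int)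
    (hInv : InvA d) (hf : cntKeyGe d n < fuel) :
    FreeSpec (fun x => d.contains x) n (getNextRoomA fuel d n).1
    ∧ (∀ x, (getNextRoomA fuel d n).2.contains x = d.contains x)
    ∧ InvA (getNextRoomA fuel d n).2 := by
  induction fuel generalizing n with
  | zero => omega
  | succ fuel ih =>
    unfold getNextRoomA
    cases hm : d.get? n with
    | none =>
      have hcn : d.contains n = false := by
        rw [PySem.Dict.contains_eq_isSome_get?, hm]; rfl
      exact ⟨⟨le_refl n, hcn, fun j h1 h2 => absurd h2 (by dsimp only; omega)⟩,
             fun x => rfl, hInv⟩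
    | some m =>
      simp only
      obtain ⟨hnm, hint⟩ := hInv (n, m) (PySem.Dict.mem_items_of_get?_eq_some d hm)
      have hcn : d.contains n = true := by
        rw [PySem.Dict.contains_eq_isSome_get?, hm]; rfl
      have hf' : cntKeyGe d m < fuel := by
        have := cntKeyGe_lt d n m hnm hm
        omega
      obtain ⟨⟨hmr, hcr, hjs⟩, hcont, hInv'⟩ := ih m hf'
      set r := (getNextRoomA fuel d m).1 with hr
      set d1 := (getNextRoomA fuel d m).2 with hd1
      have hcont' : ∀ x, (d1.insert n r).contains x = d.contains x := by
        intro x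
        rw [PySem.Dict.contains_insert, hcont x]
        by_cases hxn : x = n
        · subst hxn; simp [hcn]
        · simp [hxn]
      have hfree : FreeSpec (fun x => d.contains x) n r := by
        refine ⟨by omega, hcr, ?_⟩
        intro j h1 h2
        by_cases hjm : j < m
        · exact hint j h1 hjm
        · exact hjs j (by omega) h2
      refine ⟨hfree, hcont', ?_⟩
      intro q hq
      rcases (PySem.Dict.mem_items_insert _ _ _ _).mp hq with h | ⟨h, _⟩
      · subst h
        refine ⟨by dsimp; omega, ?_⟩
        intro j h1 h2
        rw [hcont' j]
        exact hfree.2.2 j h1 h2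
      · obtain ⟨h1, h2⟩ := hInv' q h
        refine ⟨h1, fun j hj1 hj2 => ?_⟩
        rw [hcont' j, ← hcont j]
        exact h2 j hj1 hj2

-- ----- the outer loops agree -----

lemma set_contains_add (s : PySem.Set Int) (r x : Int) :
    (s.add r).contains x = ((x == r) || s.contains x) := by
  rw [PySem.Set.add]
  by_cases hsr : s.contains r = true
  · rw [if_pos hsr]
    by_cases hxr : x = r
    · subst hxr; rw [hsr]; simp
    · simp [hxr]
  · rw [if_neg hsr]
    show (List.contains (s ++ [r]) x) = _
    rw [List.contains_append]
    have h1 : (List.contains [r] x) = (x == r) := by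
      by_cases hxr : x = r <;> simp [hxr]
    rw [h1, Bool.or_comm]
    rfl

lemma fold_eq (rooms : List Int) :
    ∀ (acc : List Int) (d : PySem.Dict Int Int) (s : PySem.Set Int),
    InvA d → (∀ x, d.contains x = s.contains x) →
    (rooms.foldl
      (fun (st : List Int × PySem.Dict Int Int) room =>
        let res := getNextRoomA (st.2.items.length + 1) st.2 room
        (st.1 ++ [res.1], res.2.insert res.1 (res.1 + 1))) (acc, d)).1
    = (rooms.foldl
      (fun (st : List Int × PySem.Set Int) room =>
        let m := findFreeB (st.2.length + 1) st.2 room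
        (st.1 ++ [m], st.2.add m)) (acc, s)).1 := by
  induction rooms with
  | nil => intro acc d s _ _; rfl
  | cons room rooms ih =>
    intro acc d s hInv hds
    simp only [List.foldl_cons]
    have hfA : cntKeyGe d room < d.items.length + 1 := by
      have := List.length_filter_le (fun q => decide (room ≤ q.1)) d.items
      simp only [cntKeyGe]
      rw [← List.countP_eq_length_filter] at this
      omega
    have hfB : cntGe s room < s.length + 1 := by
      have := List.length_filter_le (fun x => decide (room ≤ x)) s
      simp only [cntGe]
      rw [← List.countP_eq_length_filter] at this
      omega
    obtain ⟨hfreeA, hcont, hInv'⟩ := getNextRoomA_spec (d.items.length + 1) d room hInv hfA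
    have hfreeB := findFreeB_spec (s.length + 1) s room hfB
    have hmemeq : (fun x => d.contains x) = (fun x => s.contains x) := funext hds
    rw [hmemeq] at hfreeA
    have hreq : (getNextRoomA (d.items.length + 1) d room).1
        = findFreeB (s.length + 1) s room := FreeSpec_unique hfreeA hfreeB
    set r := (getNextRoomA (d.items.length + 1) d room).1 with hrdef
    set d1 := (getNextRoomA (d.items.length + 1) d room).2 with hd1def
    have hds' : ∀ x, (d1.insert r (r + 1)).contains x = ((s.add r).contains x) := by
      intro x
      rw [set_contains_add, PySem.Dict.contains_insert, hcont x, hds x]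
    have hInv'' : InvA (d1.insert r (r + 1)) := by
      intro q hq
      rcases (PySem.Dict.mem_items_insert _ _ _ _).mp hq with h | ⟨h, _⟩
      · subst h
        refine ⟨by dsimp; omega, ?_⟩
        intro j h1 h2
        have hjr : j = r := by omega
        subst hjr
        rw [PySem.Dict.contains_insert]
        simp
      · obtain ⟨h1, h2⟩ := hInv' q h
        refine ⟨h1, fun j hj1 hj2 => ?_⟩
        rw [PySem.Dict.contains_insert, h2 j hj1 hj2]
        simp
    rw [← hreq]
    exact ih (acc ++ [r]) (d1.insert r (r + 1)) (s.add r) hInv'' hds'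

-- ===== VERDICT =====
theorem solution_spec : Claim_equal_solution := by
  intro k room_number _
  unfold Spec_solution solution solution_alt
  exact fold_eq room_number [] PySem.Dict.empty PySem.Set.empty
    (by intro q hq; simp [PySem.Dict.empty] at hq)
    (by intro x; rfl)
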